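-- pv_equiv track=rewrite | github.com/Emicy963/50-Days-Code-Challenge | src/1 - Logic/ex6.py | anagrama
-- ===== SOURCE A (Python) =====
-- def anagrama(word: str) -> bool:
--     words = word.split()
--     l = []
--
--     def counter(w):
--         d = {}
--         for i in w:
--             if i not in d:
--                 d[i] = 1
--             else:
--                 d[i] += 1
--         return d
--
--     for j in words:
--         l.append(counter(j))
--     return all(x == l[0] for x in l)
-- ===== SOURCE B (Python) =====
-- def anagrama(word: str) -> bool:
--     words = word.split()
--     return all(sorted(w) == sorted(words[0]) for w in words)
-- ===== Notes on version B (the rewrite author's own statement) =====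
-- stated objective: idiomatic
-- what changed: B drops the hand-rolled frequency-dictionary helper and the intermediate list of counters, instead comparing sorted(w) against sorted(words[0]) inside a single all(...) generator.
import Mathlib
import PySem

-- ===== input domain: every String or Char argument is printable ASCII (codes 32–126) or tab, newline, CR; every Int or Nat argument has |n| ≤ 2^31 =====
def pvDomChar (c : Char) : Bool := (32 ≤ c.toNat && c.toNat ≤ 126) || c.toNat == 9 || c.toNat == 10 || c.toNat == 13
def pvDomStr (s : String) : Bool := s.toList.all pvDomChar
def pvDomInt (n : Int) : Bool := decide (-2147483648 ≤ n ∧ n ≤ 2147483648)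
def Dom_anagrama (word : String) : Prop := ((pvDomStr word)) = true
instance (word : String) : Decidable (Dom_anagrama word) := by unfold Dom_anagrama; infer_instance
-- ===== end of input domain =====

-- B replaces A's per-word frequency dictionaries (compared with Python dict ==) by
-- per-word sorted character lists inside one all(...) generator; idiomatic, not faster.

-- ===== PORT A =====
-- A's inner helper `counter`: build a dict of character frequencies by one pass over the word.
def anagramaCounter (w : List Char) : PySem.Dict Char Int :=
  w.foldl
    (fun d i =>
      if d.contains i = false then d.insert i 1 else d.modify i 0 (fun v => v + 1))
    PySem.Dict.empty

-- Python's `x == l[0]` on dicts ignores insertion order: same key set and the same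
-- value at each key (PySem.Dict `=` would compare insertion order, which Python does not).
def pyDictEq (d e : PySem.Dict Char Int) : Bool :=
  PySem.Set.equal d.keys e.keys && d.keys.all (fun k => d.getD k 0 == e.getD k 0)

def anagrama (word : String) : Bool :=
  let words := PySem.Str.split₀ word
  let l := words.foldl (fun acc j => acc ++ [anagramaCounter j.toList]) []
  -- all(x == l[0] for x in l): l[0] is only evaluated when the generator is non-empty
  match l with
  | [] => true
  | x0 :: _ => l.all (fun x => pyDictEq x x0)

-- ===== PORT B =====
def anagrama_alt (word : String) : Bool :=
  let words := PySem.Str.split₀ word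
  -- all(sorted(w) == sorted(words[0]) for w in words): words[0] only touched when non-empty
  match words with
  | [] => true
  | w0 :: _ =>
      words.all (fun w =>
        PySem.List.sorted w.toList (fun x => x) false
          == PySem.List.sorted w0.toList (fun x => x) false)

-- ===== PRECONDITION & SPEC =====
def Spec_anagrama (word : String) (out : Bool) : Prop := out = anagrama_alt word
instance (word : String) (out : Bool) : Decidable (Spec_anagrama word out) := by unfold Spec_anagrama; infer_instance

-- ===== CLAIM (what is proved, stated in full; the proofs are below) =====
def Claim_equal_anagrama : Prop := ∀ (word : String), Dom_anagrama word → Spec_anagrama word (anagrama word)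

-- ===== LEMMAS AND PROOFS =====

theorem anagramaCounter_eq (w : List Char) :
    anagramaCounter w = PySem.Dict.counter w := by
  have hf :
      (fun (d : PySem.Dict Char Int) (i : Char) =>
          if d.contains i = false then d.insert i 1 else d.modify i 0 (fun v => v + 1))
        = fun d i => d.modify i 0 (fun v => v + 1) := by
    funext d i
    by_cases h : d.contains i = false
    · simp only [h, if_true]
      unfold PySem.Dict.modify
      rw [PySem.Dict.getD_of_not_contains (h := h)]
      norm_num
    · simp [h]
  unfold anagramaCounter
  rw [hf]
  exact (PySem.Dict.counter_eq_foldl w).symm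

theorem pyDictEq_counter_iff (w v : List Char) :
    pyDictEq (PySem.Dict.counter w) (PySem.Dict.counter v) = true ↔ w.Perm v := by
  unfold pyDictEq
  simp only [Bool.and_eq_true, PySem.Dict.keys_counter, PySem.Set.equal_iff,
    PySem.Set.mem_ofList, List.all_eq_true, PySem.Dict.getD_counter, beq_iff_eq,
    Nat.cast_inj]
  constructor
  · rintro ⟨hmem, hcnt⟩
    refine List.perm_iff_count.mpr fun a => ?_
    by_cases ha : a ∈ w
    · exact hcnt a ha
    · have hav : a ∉ v := fun hv => ha ((hmem a).mpr hv)
      rw [List.count_eq_zero.mpr ha, List.count_eq_zero.mpr hav]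
  · intro h
    exact ⟨fun a => h.mem_iff, fun a _ => h.count_eq a⟩

theorem pyDictEq_eq_sorted_beq (w v : List Char) :
    pyDictEq (PySem.Dict.counter w) (PySem.Dict.counter v)
      = (PySem.List.sorted w (fun x => x) false == PySem.List.sorted v (fun x => x) false) := by
  rw [Bool.eq_iff_iff, beq_iff_eq, pyDictEq_counter_iff,
    PySem.List.sorted_id_eq_sorted_id_iff_perm]

-- ===== VERDICT (by name: the statement is the Claim_ definition above) =====
theorem anagrama_spec : Claim_equal_anagrama := by
  intro word _
  unfold Spec_anagrama anagrama anagrama_alt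
  dsimp only
  rw [PySem.List.foldl_append_singleton_eq_map]
  cases h : PySem.Str.split₀ word with
  | nil => rfl
  | cons w0 rest =>
    simp [anagramaCounter_eq, pyDictEq_eq_sorted_beq, Function.comp_def]
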